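-- pv_equiv track=rewrite | github.com/rot226/LoRaFlexSim-1.0.1 | article_c/common/plot_helpers.py | _enforce_png_eps_order
-- ===== SOURCE A (Python) =====
-- from typing import Callable, Iterable
--
-- def _normalize_export_formats(formats: Iterable[str]) -> tuple[str, ...]:
--     normalized: list[str] = []
--     for fmt in formats:
--         cleaned = str(fmt).strip().lstrip(".").lower()
--         if cleaned:
--             normalized.append(cleaned)
--     if not normalized:
--         raise ValueError("La liste des formats d'export est vide.")
--     return tuple(dict.fromkeys(normalized))
--
-- def _enforce_png_eps_order(formats: Iterable[str]) -> tuple[str, ...]: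
--     normalized = _normalize_export_formats(formats)
--     ordered = [fmt for fmt in normalized if fmt not in {"png", "eps"}]
--     prefix = []
--     if "png" in normalized:
--         prefix.append("png")
--     if "eps" in normalized:
--         prefix.append("eps")
--     return tuple(prefix + ordered)
-- ===== SOURCE B (Python) =====
-- def _enforce_png_eps_order(formats):
--     # One pass: clean and dedup while scanning, then one stable sort by priority key.
--     seen = set()
--     normalized = []
--     for fmt in formats:
--         cleaned = str(fmt).strip().lstrip(".").lower()
--         if cleaned and cleaned not in seen:
--             seen.add(cleaned)
--             normalized.append(cleaned)
--     if not normalized: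
--         raise ValueError("La liste des formats d'export est vide.")
--     priority = {"png": 0, "eps": 1}
--     return tuple(sorted(normalized, key=lambda f: priority.get(f, 2)))
-- ===== Notes on version B (the rewrite author's own statement) =====
-- stated objective: idiomatic
-- what changed: B cleans and deduplicates in a single pass with a seen-set (instead of building a list and re-deduplicating via dict.fromkeys) and replaces A's explicit partition-and-prepend reordering with one stable sort by a png/eps priority key.
import Mathlib
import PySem

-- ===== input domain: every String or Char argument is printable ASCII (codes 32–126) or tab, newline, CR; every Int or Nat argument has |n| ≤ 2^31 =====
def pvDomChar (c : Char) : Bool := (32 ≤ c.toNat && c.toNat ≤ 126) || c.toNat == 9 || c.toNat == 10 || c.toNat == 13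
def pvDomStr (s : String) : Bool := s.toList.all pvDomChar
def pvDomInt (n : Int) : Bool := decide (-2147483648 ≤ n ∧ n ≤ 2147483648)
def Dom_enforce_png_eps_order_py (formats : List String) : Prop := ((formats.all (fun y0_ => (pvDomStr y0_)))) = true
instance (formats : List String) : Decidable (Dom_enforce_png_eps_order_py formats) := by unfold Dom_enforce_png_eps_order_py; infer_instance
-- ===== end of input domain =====

-- B cleans/dedups in one pass with a seen-set and orders via a single stable sort by a
-- png/eps priority key, instead of A's list-then-dict.fromkeys dedup and explicit
-- partition-and-prepend; same return value wherever A returns (idiomatic rewrite, not faster).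


-- shared cleaning helper: str(fmt).strip().lstrip(".").lower()
-- lstrip(".") is exact as dropWhile (· == '.'): the strip-set has the single character '.'
def pvClean (s : String) : String :=
  String.ofList (PySem.Chars.lower (((PySem.Str.strip s).toList).dropWhile (fun c => c == '.')))

-- ===== PORT A =====
def enforce_png_eps_order_py (formats : List String) : List String :=
  -- _normalize_export_formats: append cleaned non-empty formats, then dict.fromkeys dedup
  -- (the ValueError on an all-empty result is excluded by Pre_)
  let normalized := PySem.List.dedup (formats.foldl (fun acc fmt =>
      let cleaned := pvClean fmt
      if cleaned ≠ "" then acc ++ [cleaned] else acc) [])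
  let ordered := normalized.filter (fun fmt =>
      !(PySem.Set.contains (PySem.Set.ofList ["png", "eps"]) fmt))
  let pfx := (if normalized.contains "png" then ["png"] else []) ++
             (if normalized.contains "eps" then ["eps"] else [])
  pfx ++ ordered

-- ===== PORT B =====
def pvPriority : PySem.Dict String Int := ⟨[("png", 0), ("eps", 1)]⟩

-- loop body of B's single cleaning/dedup pass
def pvStepB (st : PySem.Set String × List String) (fmt : String) :
    PySem.Set String × List String :=
  let cleaned := pvClean fmt
  if (cleaned != "") && !(PySem.Set.contains st.1 cleaned) then
    (PySem.Set.add st.1 cleaned, st.2 ++ [cleaned])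
  else st

def enforce_png_eps_order_py_alt (formats : List String) : List String :=
  -- one pass: clean + seen-set dedup; then one stable sort by priority key
  -- (the ValueError on an empty result is excluded by Pre_)
  let st := formats.foldl pvStepB (PySem.Set.empty, [])
  PySem.List.sorted st.2 (fun f => PySem.Dict.getD pvPriority f 2)

-- ===== PRECONDITION & SPEC =====
-- Pre_ excludes exactly the inputs where no format survives cleaning: there A (and B)
-- raise ValueError.
def Pre_enforce_png_eps_order_py (formats : List String) : Prop :=
  formats.any (fun f => pvClean f != "") = true
instance (formats : List String) : Decidable (Pre_enforce_png_eps_order_py formats) := by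
  unfold Pre_enforce_png_eps_order_py; infer_instance

def pvWitness_enforce_png_eps_order_py : List String := ["pdf", ".PNG", "png"]

def Spec_enforce_png_eps_order_py (formats : List String) (out : List String) : Prop := out = enforce_png_eps_order_py_alt formats
instance (formats : List String) (out : List String) : Decidable (Spec_enforce_png_eps_order_py formats out) := by unfold Spec_enforce_png_eps_order_py; infer_instance

-- ===== CLAIM (what is proved, stated in full; the proofs are below) =====
def Claim_equal_enforce_png_eps_order_py : Prop := ∀ (formats : List String), Dom_enforce_png_eps_order_py formats → Pre_enforce_png_eps_order_py formats → Spec_enforce_png_eps_order_py formats (enforce_png_eps_order_py formats)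

-- ===== LEMMAS AND PROOFS =====

def pvKey (f : String) : Int := PySem.Dict.getD pvPriority f 2

theorem pvKey_eq (f : String) :
    pvKey f = if f = "png" then 0 else if f = "eps" then 1 else 2 := by
  have hb1 : ∀ h : ¬ f = "png", ("png" == f) = false :=
    fun h => beq_eq_false_iff_ne.mpr (fun he => h he.symm)
  have hb2 : ∀ h : ¬ f = "eps", ("eps" == f) = false :=
    fun h => beq_eq_false_iff_ne.mpr (fun he => h he.symm)
  by_cases h1 : f = "png"
  · simp [pvKey, pvPriority, PySem.Dict.getD, PySem.Dict.get?, h1]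
  · by_cases h2 : f = "eps"
    · simp [pvKey, pvPriority, PySem.Dict.getD, PySem.Dict.get?, h2]
    · simp [pvKey, pvPriority, PySem.Dict.getD, PySem.Dict.get?, List.find?,
        h1, h2, hb1 h1, hb2 h2]

theorem pvKey_tri (f : String) : pvKey f = 0 ∨ pvKey f = 1 ∨ pvKey f = 2 := by
  rw [pvKey_eq]; split_ifs <;> simp

-- B's loop body keeps the seen-set and the output list equal
theorem pvStepB_diag (s : List String) (x : String) :
    pvStepB (s, s) x
      = (if pvClean x = "" then (s, s)
         else (PySem.Set.add s (pvClean x), PySem.Set.add s (pvClean x))) := by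
  by_cases hx : pvClean x = ""
  · simp [pvStepB, hx]
  · by_cases hc : pvClean x ∈ s <;>
      simp [pvStepB, hx, hc, PySem.Set.add, PySem.Set.contains]

-- B's single pass builds exactly the Set.add-fold of the cleaned non-empty formats
theorem pvFoldB (fs : List String) (s : List String) :
    fs.foldl pvStepB (s, s)
      = (let u := ((fs.filter (fun x => pvClean x != "")).map pvClean).foldl PySem.Set.add s
         (u, u)) := by
  induction fs generalizing s with
  | nil => simp
  | cons x fs ih =>
    rw [List.foldl_cons, pvStepB_diag]
    by_cases hx : pvClean x = ""
    · simp [hx, ih]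
    · simp [hx, ih]

theorem pvInsertBy_append (bef : String → String → Bool) (x : String) (P ys : List String)
    (h : ∀ y ∈ P, bef x y = false) :
    PySem.List.insertBy bef x (P ++ ys) = P ++ PySem.List.insertBy bef x ys := by
  induction P with
  | nil => simp
  | cons p P ih =>
    have hp := h p (by simp)
    simp [PySem.List.insertBy, hp, ih (by intro y hy; exact h y (by simp [hy]))]

theorem pvInsertBy_all_before (bef : String → String → Bool) (x : String) (ys : List String)
    (h : ∀ y ∈ ys, bef x y = true) :
    PySem.List.insertBy bef x ys = x :: ys := by
  cases ys with
  | nil => rfl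
  | cons y ys => simp [PySem.List.insertBy, h y (by simp)]

-- stable insertion sort with the three-valued priority key is the concatenation of groups
theorem pvSorted_tri (N : List String) (A0 A1 A2 : List String)
    (h0 : ∀ a ∈ A0, pvKey a = 0) (h1 : ∀ a ∈ A1, pvKey a = 1) (h2 : ∀ a ∈ A2, pvKey a = 2) :
    N.foldl (fun acc x => PySem.List.insertBy (fun a b => decide (pvKey a < pvKey b)) x acc)
        (A0 ++ A1 ++ A2)
      = (A0 ++ N.filter (fun f => pvKey f == 0)) ++ (A1 ++ N.filter (fun f => pvKey f == 1))
          ++ (A2 ++ N.filter (fun f => pvKey f == 2)) := by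
  induction N generalizing A0 A1 A2 with
  | nil => simp
  | cons x N ih =>
    rw [List.foldl_cons]
    rcases pvKey_tri x with hk | hk | hk
    · have hstep : PySem.List.insertBy (fun a b => decide (pvKey a < pvKey b)) x
          (A0 ++ A1 ++ A2) = (A0 ++ [x]) ++ A1 ++ A2 := by
        rw [List.append_assoc, pvInsertBy_append _ x A0 (A1 ++ A2)
          (by intro y hy; simp [hk, h0 y hy]),
          pvInsertBy_all_before _ x (A1 ++ A2)
          (by intro y hy
              rcases List.mem_append.mp hy with h | h
              · simp [hk, h1 y h]
              · simp [hk, h2 y h])]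
        simp
      rw [hstep, ih (A0 ++ [x]) A1 A2
        (by intro a ha; rcases List.mem_append.mp ha with h | h
            · exact h0 a h
            · simp_all) h1 h2]
      simp [hk]
    · have hstep : PySem.List.insertBy (fun a b => decide (pvKey a < pvKey b)) x
          (A0 ++ A1 ++ A2) = A0 ++ (A1 ++ [x]) ++ A2 := by
        rw [List.append_assoc, pvInsertBy_append _ x A0 (A1 ++ A2)
          (by intro y hy; simp [hk, h0 y hy]),
          pvInsertBy_append _ x A1 A2 (by intro y hy; simp [hk, h1 y hy]),
          pvInsertBy_all_before _ x A2 (by intro y hy; simp [hk, h2 y hy])]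
        simp
      rw [hstep, ih A0 (A1 ++ [x]) A2 h0
        (by intro a ha; rcases List.mem_append.mp ha with h | h
            · exact h1 a h
            · simp_all) h2]
      simp [hk]
    · have hstep : PySem.List.insertBy (fun a b => decide (pvKey a < pvKey b)) x
          (A0 ++ A1 ++ A2) = A0 ++ A1 ++ (A2 ++ [x]) := by
        rw [PySem.List.insertBy_of_forall_not_before _ x (A0 ++ A1 ++ A2)
          (by intro y hy
              rcases List.mem_append.mp hy with h | h
              · rcases List.mem_append.mp h with h' | h'
                · simp [hk, h0 y h']
                · simp [hk, h1 y h']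
              · simp [hk, h2 y h])]
        simp
      rw [hstep, ih A0 A1 (A2 ++ [x]) h0 h1
        (by intro a ha; rcases List.mem_append.mp ha with h | h
            · exact h2 a h
            · simp_all)]
      simp [hk]

-- filtering the key-0 / key-1 groups out of a nodup list yields the png/eps prefix pieces
theorem pvFilter_key0 (N : List String) (hN : N.Nodup) :
    N.filter (fun f => pvKey f == 0) = if N.contains "png" then ["png"] else [] := by
  have : N.filter (fun f => pvKey f == 0) = N.filter (fun f => f == "png") := by
    apply List.filter_congr
    intro f _
    rw [pvKey_eq]
    by_cases h1 : f = "png"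
    · simp [h1]
    · by_cases h2 : f = "eps" <;> simp [h1, h2]
  rw [this, List.filter_beq]
  by_cases hm : "png" ∈ N
  · simp [hm, List.count_eq_one_of_mem hN hm]
  · simp [hm, List.count_eq_zero_of_not_mem hm]

theorem pvFilter_key1 (N : List String) (hN : N.Nodup) :
    N.filter (fun f => pvKey f == 1) = if N.contains "eps" then ["eps"] else [] := by
  have : N.filter (fun f => pvKey f == 1) = N.filter (fun f => f == "eps") := by
    apply List.filter_congr
    intro f _
    rw [pvKey_eq]
    by_cases h1 : f = "png"
    · simp [h1]
    · by_cases h2 : f = "eps" <;> simp [h1, h2]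
  rw [this, List.filter_beq]
  by_cases hm : "eps" ∈ N
  · simp [hm, List.count_eq_one_of_mem hN hm]
  · simp [hm, List.count_eq_zero_of_not_mem hm]

theorem pvFilter_key2 (N : List String) :
    N.filter (fun f => pvKey f == 2)
      = N.filter (fun f => !(PySem.Set.contains (PySem.Set.ofList ["png", "eps"]) f)) := by
  apply List.filter_congr
  intro f _
  rw [pvKey_eq]
  by_cases h1 : f = "png"
  · simp [PySem.Set.contains, PySem.Set.ofList, PySem.Set.add, h1]
  · by_cases h2 : f = "eps" <;>
      simp [PySem.Set.contains, PySem.Set.ofList, PySem.Set.add, h1, h2]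

-- ===== VERDICT (by name: the statement is the Claim_ definition above) =====

theorem enforce_png_eps_order_py_spec : Claim_equal_enforce_png_eps_order_py := by
  intro formats _ _
  unfold Spec_enforce_png_eps_order_py enforce_png_eps_order_py enforce_png_eps_order_py_alt
  -- both normalizations produce N := dedup of the cleaned non-empty formats
  have hA : (formats.foldl (fun acc fmt =>
        let cleaned := pvClean fmt
        if cleaned ≠ "" then acc ++ [cleaned] else acc) ([] : List String))
      = (formats.filter (fun x => pvClean x != "")).map pvClean := by
    have := PySem.List.foldl_append_if (fun x => pvClean x != "") pvClean formats []
    simpa [ne_eq] using this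
  set C := (formats.filter (fun x => pvClean x != "")).map pvClean with hC
  have hB : formats.foldl pvStepB (PySem.Set.empty, ([] : List String))
      = (C.foldl PySem.Set.add [], C.foldl PySem.Set.add []) := pvFoldB formats []
  rw [hA, hB]
  set N := PySem.List.dedup C with hNdef
  have hfold : C.foldl PySem.Set.add [] = N := by
    rw [hNdef, PySem.List.dedup, PySem.Set.ofList_eq_foldl]
  have hN : N.Nodup := by rw [hNdef, PySem.List.dedup]; exact PySem.Set.nodup_ofList C
  simp only [hfold]
  -- the stable sort splits into the three priority groups
  have hsort : PySem.List.sorted N (fun f => PySem.Dict.getD pvPriority f 2) false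
      = N.filter (fun f => pvKey f == 0) ++ N.filter (fun f => pvKey f == 1)
          ++ N.filter (fun f => pvKey f == 2) := by
    have := pvSorted_tri N [] [] [] (by simp) (by simp) (by simp)
    simpa [PySem.List.sorted, pvKey] using this
  rw [hsort, pvFilter_key0 N hN, pvFilter_key1 N hN, pvFilter_key2 N]
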